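-- pv_equiv track=rewrite | github.com/FashtimeDotCom/OpenMDAO | openmdao/core/group.py | _get_implicit_connections
-- ===== SOURCE A (Python) =====
-- def _get_implicit_connections(params_dict, unknowns_dict):
--     """Finds all matches between relative names of parameters and
--     unknowns.  Any matches imply an implicit connection.  All
--     connections are expressed using absolute pathnames.
--
--     This should only be called using params and unknowns from the
--     top level `Group` in the system tree.
--
--     Parameters
--     ----------
--     params_dict : dict
--         dictionary of metadata for all parameters in this `Group`
--
--     unknowns_dict : dict
--         dictionary of metadata for all unknowns in this `Group`
--
--     Returns
--     -------
--     dict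
--         implicit connections in this `Group`, represented as a mapping
--         from the pathname of the target to the pathname of the source
--
--     Raises
--     ------
--     RuntimeError
--         if a a promoted variable name matches multiple unknowns
--     """
--
--     # collect all absolute names that map to each relative name
--     abs_unknowns = {}
--     for abs_name, u in unknowns_dict.items():
--         abs_unknowns.setdefault(u['relative_name'], []).append(abs_name)
--
--     abs_params = {}
--     for abs_name, p in params_dict.items():
--         abs_params.setdefault(p['relative_name'], []).append(abs_name)
--
--     # check if any relative names correspond to mutiple unknowns
--     for name, lst in abs_unknowns.items():
--         if len(lst) > 1:
--             raise RuntimeError("Promoted name %s matches multiple unknowns: %s" %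
--                                (name, lst))
--
--     connections = {}
--     for uname, uabs in abs_unknowns.items():
--         pabs = abs_params.get(uname, ())
--         for p in pabs:
--             connections[p] = uabs[0]
--
--     return connections
-- ===== SOURCE B (Python) =====
-- def _get_implicit_connections(params_dict, unknowns_dict):
--     """Index-free variant: no rel->names dictionaries at all.  Uniqueness of
--     promoted unknown names is checked by a direct pairwise scan over the
--     unknowns, and connections are produced by a plain nested scan: for each
--     unknown, every param whose relative name equals it is connected to it."""
--
--     # uniqueness of promoted unknown names, by direct scan (no grouping index)
--     for _, u in unknowns_dict.items():
--         rel = u['relative_name']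
--         matches = [n for n, v in unknowns_dict.items()
--                    if v['relative_name'] == rel]
--         if len(matches) > 1:
--             raise RuntimeError("Promoted name %s matches multiple unknowns: %s" %
--                                (rel, matches))
--
--     connections = {}
--     for abs_u, u in unknowns_dict.items():
--         rel = u['relative_name']
--         for abs_p, p in params_dict.items():
--             if p['relative_name'] == rel:
--                 connections[abs_p] = abs_u
--
--     return connections
-- ===== Notes on version B (the rewrite author's own statement) =====
-- stated objective: alternative
-- what changed: B builds no rel->abs-names indexes at all: uniqueness of promoted unknown names is checked by a direct pairwise scan over the unknowns, and connections come from a plain nested scan of unknowns x params comparing relative names directly, trading A's O(P+U) hash-index joins for index-free O(U^2 + U*P) scans.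
import Mathlib
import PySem

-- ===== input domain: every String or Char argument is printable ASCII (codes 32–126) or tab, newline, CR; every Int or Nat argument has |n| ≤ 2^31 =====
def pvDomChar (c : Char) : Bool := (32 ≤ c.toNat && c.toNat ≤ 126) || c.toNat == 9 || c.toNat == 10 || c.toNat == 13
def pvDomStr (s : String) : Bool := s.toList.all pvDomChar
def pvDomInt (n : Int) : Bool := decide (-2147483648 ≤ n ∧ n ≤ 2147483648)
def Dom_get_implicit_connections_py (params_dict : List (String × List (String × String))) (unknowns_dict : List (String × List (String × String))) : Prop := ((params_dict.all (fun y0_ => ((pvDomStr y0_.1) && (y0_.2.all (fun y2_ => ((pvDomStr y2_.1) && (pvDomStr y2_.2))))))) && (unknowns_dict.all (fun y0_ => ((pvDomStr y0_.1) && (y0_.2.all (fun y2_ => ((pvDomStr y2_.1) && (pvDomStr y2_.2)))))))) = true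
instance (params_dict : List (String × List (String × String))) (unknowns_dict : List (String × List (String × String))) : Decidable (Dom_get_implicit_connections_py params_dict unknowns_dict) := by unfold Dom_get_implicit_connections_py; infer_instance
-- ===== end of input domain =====

-- B replaces A's two hash indexes with index-free nested scans over unknowns × params (return value only).

-- ===== PORT A =====
-- m['relative_name'] (a missing key is a KeyError, excluded by Pre_, so getD)
def relOf (m : List (String × String)) : String :=
  (PySem.Dict.mk m).getD "relative_name" ""

-- the 'setdefault(rel, []).append(abs_name)' grouping loop of A
def groupByRel (d : List (String × List (String × String))) : PySem.Dict String (List String) :=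
  d.foldl (fun acc kv => acc.modify (relOf kv.2) [] (· ++ [kv.1])) PySem.Dict.empty

def get_implicit_connections_py (params_dict : List (String × List (String × String))) (unknowns_dict : List (String × List (String × String))) : List (String × String) :=
  let abs_unknowns := groupByRel unknowns_dict
  let abs_params := groupByRel params_dict
  -- the 'len(lst) > 1' loop raises RuntimeError on a duplicate promoted unknown name; excluded by Pre_
  (abs_unknowns.items.foldl (fun conns ug =>
      (abs_params.getD ug.1 []).foldl (fun c p => c.insert p (ug.2.headD "")) conns)  -- uabs[0]: groups are nonempty
    PySem.Dict.empty).items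

-- ===== PORT B =====
def get_implicit_connections_py_alt (params_dict : List (String × List (String × String))) (unknowns_dict : List (String × List (String × String))) : List (String × String) :=
  -- B's pairwise uniqueness scan only raises RuntimeError (excluded by Pre_); it builds no state
  (unknowns_dict.foldl (fun (conns : PySem.Dict String String) ukv =>
      params_dict.foldl (fun c pkv =>
          if relOf pkv.2 == relOf ukv.2 then c.insert pkv.1 ukv.1 else c) conns)
    PySem.Dict.empty).items

-- ===== PRECONDITION & SPEC =====
-- Pre_ excludes: assoc lists with duplicate keys (outer or inner), which represent no Python dict;
-- metadata missing 'relative_name' (A raises KeyError); duplicate promoted unknown names (A raises RuntimeError).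
def Pre_get_implicit_connections_py (params_dict : List (String × List (String × String))) (unknowns_dict : List (String × List (String × String))) : Prop :=
  (params_dict.map Prod.fst).Nodup ∧ (unknowns_dict.map Prod.fst).Nodup ∧
  (∀ kv ∈ params_dict ++ unknowns_dict,
     (kv.2.map Prod.fst).Nodup ∧ ((PySem.Dict.mk kv.2).get? "relative_name").isSome) ∧
  (unknowns_dict.map (fun kv => (PySem.Dict.mk kv.2).getD "relative_name" "")).Nodup
instance (params_dict : List (String × List (String × String))) (unknowns_dict : List (String × List (String × String))) : Decidable (Pre_get_implicit_connections_py params_dict unknowns_dict) := by unfold Pre_get_implicit_connections_py; infer_instance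

def pvWitness_get_implicit_connections_py : (List (String × List (String × String))) × (List (String × List (String × String))) :=
  ([("comp.x", [("relative_name", "x")]), ("comp.y", [("relative_name", "y")])],
   [("src.x", [("relative_name", "x")])])

def Spec_get_implicit_connections_py (params_dict : List (String × List (String × String))) (unknowns_dict : List (String × List (String × String))) (out : List (String × String)) : Prop := out = get_implicit_connections_py_alt params_dict unknowns_dict
instance (params_dict : List (String × List (String × String))) (unknowns_dict : List (String × List (String × String))) (out : List (String × String)) : Decidable (Spec_get_implicit_connections_py params_dict unknowns_dict out) := by unfold Spec_get_implicit_connections_py; infer_instance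

-- ===== CLAIM (what is proved, stated in full; the proofs are below) =====
def Claim_equal_get_implicit_connections_py : Prop := ∀ (params_dict : List (String × List (String × String))) (unknowns_dict : List (String × List (String × String))), Dom_get_implicit_connections_py params_dict unknowns_dict → Pre_get_implicit_connections_py params_dict unknowns_dict → Spec_get_implicit_connections_py params_dict unknowns_dict (get_implicit_connections_py params_dict unknowns_dict)


-- ===== LEMMAS AND PROOFS =====

-- A's params index, queried at any rel, is the ordered list of matching abs param names
lemma getD_groupByRel (l : List (String × List (String × String))) (k : String) :
    (groupByRel l).getD k []
      = ((l.filter (fun kv => relOf kv.2 == k)).map Prod.fst) := by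
  have h : groupByRel l
      = (l.map (fun kv => (relOf kv.2, kv.1))).foldl
          (fun d p => d.modify p.1 [] (· ++ [p.2])) PySem.Dict.empty := by
    simp [groupByRel, List.foldl_map]
  rw [h, PySem.Dict.getD_foldl_modify_append]
  simp [PySem.Dict.getD_empty, List.filter_map, List.map_map, Function.comp_def]

lemma modify_fresh_items (d : PySem.Dict String (List String)) (k : String)
    (f : List String → List String) (h : d.contains k = false) :
    (d.modify k [] f).items = d.items ++ [(k, f [])] := by
  simp [PySem.Dict.modify, PySem.Dict.items_insert, h, PySem.Dict.getD_of_not_contains d [] h]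

-- under distinct relative names, A's grouping of the unknowns yields singleton groups in order
lemma groupByRel_items_of_nodup (l : List (String × List (String × String)))
    (d : PySem.Dict String (List String))
    (hfresh : ∀ kv ∈ l, d.contains (relOf kv.2) = false)
    (hnd : (l.map (fun kv => relOf kv.2)).Nodup) :
    (l.foldl (fun acc kv => acc.modify (relOf kv.2) [] (· ++ [kv.1])) d).items
      = d.items ++ l.map (fun kv => (relOf kv.2, [kv.1])) := by
  induction l generalizing d with
  | nil => simp
  | cons kv t ih =>
    have h12 : (∀ x y, (x, y) ∈ t → ¬ relOf y = relOf kv.2) ∧ (t.map (fun kv => relOf kv.2)).Nodup := by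
      simpa using hnd
    simp only [List.foldl_cons, List.map_cons]
    rw [ih]
    · rw [modify_fresh_items d _ _ (hfresh kv (by simp))]
      simp
    · intro kv' hkv'
      rw [PySem.Dict.contains_modify]
      have hne : relOf kv'.2 ≠ relOf kv.2 := fun he => h12.1 kv'.1 kv'.2 hkv' he
      simp [hne, hfresh kv' (by simp [hkv'])]
    · exact h12.2

-- B's guarded scan over params equals a fold over the matching params
lemma filter_scan_eq (l : List (String × List (String × String))) (rel v : String)
    (c : PySem.Dict String String) :
    l.foldl (fun c pkv => if relOf pkv.2 == rel then c.insert pkv.1 v else c) c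
      = ((l.filter (fun kv => relOf kv.2 == rel)).map Prod.fst).foldl
          (fun c p => c.insert p v) c := by
  induction l generalizing c with
  | nil => rfl
  | cons pkv t ih =>
    rw [List.foldl_cons, List.filter_cons]
    by_cases h : (relOf pkv.2 == rel) = true
    · rw [if_pos h, if_pos h, List.map_cons, List.foldl_cons]; exact ih _
    · rw [if_neg h, if_neg h]; exact ih _

-- ===== VERDICT (by name: the statement is the Claim_ definition above) =====
theorem get_implicit_connections_py_spec : Claim_equal_get_implicit_connections_py := by
  intro params_dict unknowns_dict _hdom hpre
  obtain ⟨_, _, _, hnd⟩ := hpre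
  have hnd' : (unknowns_dict.map (fun kv => relOf kv.2)).Nodup := hnd
  unfold Spec_get_implicit_connections_py
  show ((groupByRel unknowns_dict).items.foldl (fun conns ug =>
          ((groupByRel params_dict).getD ug.1 []).foldl (fun c p => c.insert p (ug.2.headD "")) conns)
        PySem.Dict.empty).items = _
  rw [show (groupByRel unknowns_dict).items = unknowns_dict.map (fun kv => (relOf kv.2, [kv.1])) from by
    rw [groupByRel, groupByRel_items_of_nodup _ _ (by intro kv _; simp [PySem.Dict.contains_empty]) hnd']
    simp [PySem.Dict.empty]]
  rw [List.foldl_map]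
  unfold get_implicit_connections_py_alt
  congr 1
  apply List.foldl_ext
  intro c ukv _
  rw [getD_groupByRel, filter_scan_eq]; rfl
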